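-- pv_equiv track=rewrite | github.com/rapidsai/velox-testing | scripts/workflow_status/lib/slack.py | split_code_blocks
-- ===== SOURCE A (Python) =====
-- def split_code_blocks(section: str) -> list[str]:
--     """Split a section into alternating text and code-fenced fragments."""
--     fragments: list[str] = []
--     current: list[str] = []
--     in_code = False
--     for line in section.splitlines(keepends=True):
--         stripped = line.strip()
--         if stripped.startswith("```"):
--             if in_code:
--                 current.append(line)
--                 fragments.append("".join(current).strip())
--                 current = []
--                 in_code = False
--             else:
--                 text_before = "".join(current).strip()
--                 if text_before:
--                     fragments.append(text_before)
--                 current = [line]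
--                 in_code = True
--         else:
--             current.append(line)
--     trailing = "".join(current).strip()
--     if trailing:
--         if in_code:
--             trailing += "\n```"
--         fragments.append(trailing)
--     return [f for f in fragments if f]
-- ===== SOURCE B (Python) =====
-- def _span_nonfence(lines):
--     """Split lines at the first code-fence line: (prefix without fences, rest)."""
--     for j, l in enumerate(lines):
--         if l.strip().startswith("```"):
--             return lines[:j], lines[j:]
--     return lines, []
--
--
-- def split_code_blocks(section: str) -> list[str]:
--     """Split a section into alternating text and code-fenced fragments."""
--     lines = section.splitlines(keepends=True)
--     fragments: list[str] = []
--     while lines: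
--         pre, rest = _span_nonfence(lines)
--         text = "".join(pre).strip()
--         if text:
--             fragments.append(text)
--         if not rest:
--             break
--         fence, after = rest[0], rest[1:]
--         body, rest2 = _span_nonfence(after)
--         if rest2:
--             code = "".join([fence] + body + [rest2[0]]).strip()
--             if code:
--                 fragments.append(code)
--             lines = rest2[1:]
--         else:
--             code = "".join([fence] + body).strip()
--             if code:
--                 fragments.append(code + "\n```")
--             lines = []
--     return fragments
-- ===== Notes on version B (the rewrite author's own statement) =====
-- stated objective: alternative
-- what changed: Replaces A's per-line state machine (in_code flag with a running line buffer) by a two-level scan that repeatedly span-splits the line list at fence lines, carving whole text spans and fence-delimited code spans in one step each.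
import Mathlib
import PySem

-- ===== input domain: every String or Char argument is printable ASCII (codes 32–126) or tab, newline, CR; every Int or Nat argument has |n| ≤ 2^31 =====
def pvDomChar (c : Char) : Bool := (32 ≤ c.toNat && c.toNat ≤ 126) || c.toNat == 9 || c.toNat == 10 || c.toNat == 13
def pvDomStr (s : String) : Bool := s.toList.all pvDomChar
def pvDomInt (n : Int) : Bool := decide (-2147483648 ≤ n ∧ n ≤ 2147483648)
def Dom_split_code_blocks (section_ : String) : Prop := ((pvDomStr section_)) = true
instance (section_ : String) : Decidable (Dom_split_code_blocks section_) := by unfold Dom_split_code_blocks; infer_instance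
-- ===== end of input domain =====

-- B replaces A's per-line state machine (in_code flag + running buffer) with a two-level scan that
-- carves the line list at fence lines using span-style splits; same return value, alternative decomposition.

-- shared helper: section.splitlines(keepends=True); exact on the domain's line breaks '\n', '\r', '\r\n'
def pvSlkGo (acc : List Char) : List Char → List (List Char)
  | [] => if acc = [] then [] else [acc.reverse]
  | '\r' :: '\n' :: rest => (acc.reverse ++ ['\r', '\n']) :: pvSlkGo [] rest
  | '\r' :: rest => (acc.reverse ++ ['\r']) :: pvSlkGo [] rest
  | '\n' :: rest => (acc.reverse ++ ['\n']) :: pvSlkGo [] rest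
  | c :: rest => pvSlkGo (c :: acc) rest

def pvSlk (cs : List Char) : List (List Char) := pvSlkGo [] cs

-- shared helper: line.strip().startswith("```")
def pvIsFence (l : List Char) : Bool :=
  PySem.Chars.startswith (PySem.Chars.strip l) ['`', '`', '`']

def pvTick : List Char := ['\n', '`', '`', '`']

-- ===== PORT A =====
-- A's loop: state (fragments, current, in_code); "".join(current) is current.flatten
def pvGoA : List (List Char) → List (List Char) → List (List Char) → Bool → List (List Char)
  | [], frags, current, in_code =>
      let trailing := PySem.Chars.strip current.flatten
      if trailing ≠ [] then frags ++ [if in_code then trailing ++ pvTick else trailing] else frags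
  | l :: rest, frags, current, in_code =>
      if pvIsFence l then
        if in_code then
          pvGoA rest (frags ++ [PySem.Chars.strip (current ++ [l]).flatten]) [] false
        else
          let tb := PySem.Chars.strip current.flatten
          pvGoA rest (if tb ≠ [] then frags ++ [tb] else frags) [l] true
      else
        pvGoA rest frags (current ++ [l]) in_code

def split_code_blocks (section_ : String) : List String :=
  ((pvGoA (pvSlk section_.toList) [] [] false).filter (· ≠ [])).map String.ofList

-- ===== PORT B =====
-- B: carve the line list at fence lines (span-style: takeWhile/dropWhile on "not a fence line")
def pvCarve (lines : List (List Char)) : List String :=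
  (if PySem.Chars.strip (lines.takeWhile (fun l => !pvIsFence l)).flatten ≠ [] then
      [String.ofList (PySem.Chars.strip (lines.takeWhile (fun l => !pvIsFence l)).flatten)]
    else []) ++
  match h : lines.dropWhile (fun l => !pvIsFence l) with
  | [] => []
  | fence :: after =>
      match h2 : after.dropWhile (fun l => !pvIsFence l) with
      | closer :: rest3 =>
          (if PySem.Chars.strip ((fence :: after.takeWhile (fun l => !pvIsFence l)) ++ [closer]).flatten ≠ [] then
              [String.ofList (PySem.Chars.strip ((fence :: after.takeWhile (fun l => !pvIsFence l)) ++ [closer]).flatten)]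
            else []) ++ pvCarve rest3
      | [] =>
          if PySem.Chars.strip (fence :: after.takeWhile (fun l => !pvIsFence l)).flatten ≠ [] then
            [String.ofList (PySem.Chars.strip (fence :: after.takeWhile (fun l => !pvIsFence l)).flatten ++ pvTick)]
          else []
termination_by lines.length
decreasing_by
  have hle1 : (lines.dropWhile (fun l => !pvIsFence l)).length ≤ lines.length :=
    List.length_dropWhile_le _ _
  have hle2 : (after.dropWhile (fun l => !pvIsFence l)).length ≤ after.length :=
    List.length_dropWhile_le _ _
  rw [h] at hle1
  rw [h2] at hle2
  simp at hle1 hle2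
  omega

def split_code_blocks_alt (section_ : String) : List String :=
  pvCarve (pvSlk section_.toList)

-- ===== PRECONDITION & SPEC =====
def Spec_split_code_blocks (section_ : String) (out : List String) : Prop := out = split_code_blocks_alt section_
instance (section_ : String) (out : List String) : Decidable (Spec_split_code_blocks section_ out) := by unfold Spec_split_code_blocks; infer_instance

-- ===== CLAIM (what is proved, stated in full; the proofs are below) =====
def Claim_equal_split_code_blocks : Prop := ∀ (section_ : String), Dom_split_code_blocks section_ → Spec_split_code_blocks section_ (split_code_blocks section_)

-- ===== LEMMAS AND PROOFS =====

-- text-mode phase of A jumps to the first fence line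
theorem pvGoA_text (lines frags cur : List (List Char)) :
    pvGoA lines frags cur false =
      (let tb := PySem.Chars.strip (cur.flatten ++ (lines.takeWhile (fun l => !pvIsFence l)).flatten)
       let frags' := if tb ≠ [] then frags ++ [tb] else frags
       match lines.dropWhile (fun l => !pvIsFence l) with
       | [] => frags'
       | f :: after => pvGoA after frags' [f] true) := by
  induction lines generalizing cur with
  | nil => simp [pvGoA]
  | cons l rest ih =>
      by_cases hf : pvIsFence l
      · simp [pvGoA, hf]
      · have hf' : pvIsFence l = false := by simpa using hf
        rw [show pvGoA (l :: rest) frags cur false = pvGoA rest frags (cur ++ [l]) false from by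
              simp [pvGoA, hf'],
            ih (cur ++ [l])]
        simp [hf', List.append_assoc]

-- code-mode phase of A jumps to the closing fence line (or the end)
theorem pvGoA_code (lines frags cur : List (List Char)) :
    pvGoA lines frags cur true =
      (match lines.dropWhile (fun l => !pvIsFence l) with
       | [] =>
           let tr := PySem.Chars.strip (cur.flatten ++ (lines.takeWhile (fun l => !pvIsFence l)).flatten)
           if tr ≠ [] then frags ++ [tr ++ pvTick] else frags
       | closer :: rest3 =>
           pvGoA rest3
             (frags ++ [PySem.Chars.strip (cur.flatten ++ (lines.takeWhile (fun l => !pvIsFence l)).flatten ++ closer)])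
             [] false) := by
  induction lines generalizing cur with
  | nil => simp [pvGoA]
  | cons l rest ih =>
      by_cases hf : pvIsFence l
      · simp [pvGoA, hf]
      · have hf' : pvIsFence l = false := by simpa using hf
        rw [show pvGoA (l :: rest) frags cur true = pvGoA rest frags (cur ++ [l]) true from by
              simp [pvGoA, hf'],
            ih (cur ++ [l])]
        simp [hf', List.append_assoc]

-- filter/map distributes over a guarded append
theorem filter_map_append (frags : List (List Char)) (x : List Char) :
    (((frags ++ [x]).filter (· ≠ [])).map String.ofList) =
      ((frags.filter (· ≠ [])).map String.ofList) ++ (if x ≠ [] then [String.ofList x] else []) := by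
  by_cases hx : x = [] <;> simp [List.filter_append, hx]

-- guarded append through filter/map
theorem fm_guard (frags : List (List Char)) (tb : List Char) :
    (((if tb ≠ [] then frags ++ [tb] else frags).filter (· ≠ [])).map String.ofList) =
      ((frags.filter (· ≠ [])).map String.ofList) ++ (if tb ≠ [] then [String.ofList tb] else []) := by
  by_cases h : tb = [] <;> simp [h, List.filter_append]

-- guarded append of an open code block (the "\n```" suffix keeps it nonempty)
theorem fm_guard_tick (frags : List (List Char)) (tr : List Char) :
    (((if tr ≠ [] then frags ++ [tr ++ pvTick] else frags).filter (· ≠ [])).map String.ofList) =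
      ((frags.filter (· ≠ [])).map String.ofList) ++
        (if tr ≠ [] then [String.ofList (tr ++ pvTick)] else []) := by
  by_cases h : tr = [] <;> simp [h, List.filter_append, pvTick]

-- the main invariant: A's loop from text mode, filtered, equals B's carve appended to the old fragments
theorem pvMain (lines frags : List (List Char)) :
    ((pvGoA lines frags [] false).filter (· ≠ [])).map String.ofList =
      ((frags.filter (· ≠ [])).map String.ofList) ++ pvCarve lines := by
  rw [pvGoA_text, pvCarve]
  cases h : lines.dropWhile (fun l => !pvIsFence l) with
  | nil =>
      simp only [h]
      rw [fm_guard]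
      simp
  | cons fence after =>
      simp only [h]
      rw [pvGoA_code]
      cases h2 : after.dropWhile (fun l => !pvIsFence l) with
      | nil =>
          simp only [h2]
          rw [fm_guard_tick, fm_guard]
          simp [List.append_assoc]
      | cons closer rest3 =>
          simp only [h2]
          rw [pvMain rest3, filter_map_append, fm_guard]
          simp [List.append_assoc]
termination_by lines.length
decreasing_by
  have hle1 : (lines.dropWhile (fun l => !pvIsFence l)).length ≤ lines.length :=
    List.length_dropWhile_le _ _
  have hle2 : (after.dropWhile (fun l => !pvIsFence l)).length ≤ after.length :=
    List.length_dropWhile_le _ _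
  rw [h] at hle1
  rw [h2] at hle2
  simp at hle1 hle2
  omega

-- ===== VERDICT (by name: the statement is the Claim_ definition above) =====
theorem split_code_blocks_spec : Claim_equal_split_code_blocks := by
  intro s _
  unfold Spec_split_code_blocks split_code_blocks split_code_blocks_alt
  simpa using pvMain (pvSlk s.toList) []
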